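-- pv_equiv track=rewrite | github.com/padiks/flask-modular-library | apps/utils/breadcrumb.py | build_breadcrumb
-- ===== SOURCE A (Python) =====
-- def pretty_name(name):
--     """
--     Convert a string (e.g., 'book_title') into a more readable format (e.g., 'Book title').
--
--     This function replaces underscores and hyphens with spaces, converts the string to lowercase,
--     and then capitalizes the first letter of the string.
--     """
--     s = name.replace('_', ' ').replace('-', ' ').lower()  # Replace underscores and hyphens with spaces, then convert to lowercase
--     return s[:1].upper() + s[1:]  # Capitalize the first letter and return the modified string
--
-- def build_breadcrumb(section_name, subpath=''):
--     """
--     Build a breadcrumb trail for a section with an optional subpath.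
--
--     The breadcrumb trail shows the hierarchy of the section and subpath, making it easy to navigate.
--     Each breadcrumb is a tuple containing the human-readable name and the corresponding URL path.
--
--     Example:
--     For `section_name='books'` and `subpath='chapter-1/part-a'`, it will return a breadcrumb like:
--     [("Books", "/books/"), ("Chapter 1", "/books/chapter-1/"), ("Part A", "/books/chapter-1/part-a/")]
--     """
--     # Split the subpath into parts if any; else use an empty list
--     parts = subpath.strip('/').split('/') if subpath else []
--
--     # Start with the breadcrumb for the section (e.g., "Books")
--     breadcrumb = [(pretty_name(section_name), f'/{section_name}/')]
--
--     accumulated_path = ''  # Initialize an empty string to build the path dynamically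
--     # Loop through each part of the subpath to build breadcrumb links
--     for part in parts:
--         accumulated_path = f"{accumulated_path}/{part}".lstrip('/')  # Accumulate the path for each part
--         breadcrumb.append((pretty_name(part), f"/{section_name}/{accumulated_path}/"))  # Add each part to the breadcrumb
--
--     return breadcrumb  # Return the final breadcrumb list
-- ===== SOURCE B (Python) =====
-- def _pretty(name):
--     chars = [' ' if c in '_-' else c.lower() for c in name]
--     return chars[0].upper() + ''.join(chars[1:]) if chars else ''
--
--
-- def build_breadcrumb(section_name, subpath=''):
--     parts = subpath.strip('/').split('/') if subpath else []
--     head = (_pretty(section_name), f'/{section_name}/')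
--     return [head] + [
--         (_pretty(parts[i]), f"/{section_name}/{'/'.join(parts[:i + 1])}/")
--         for i in range(len(parts))
--     ]
-- ===== Notes on version B (the rewrite author's own statement) =====
-- stated objective: alternative
-- what changed: B drops A's threaded accumulated_path string (with its repeated lstrip('/')) and builds each breadcrumb URL independently as '/'.join(parts[:i+1]) in a comprehension, and replaces A's replace/replace/lower string chain in pretty_name by a single per-character map.
import Mathlib
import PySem

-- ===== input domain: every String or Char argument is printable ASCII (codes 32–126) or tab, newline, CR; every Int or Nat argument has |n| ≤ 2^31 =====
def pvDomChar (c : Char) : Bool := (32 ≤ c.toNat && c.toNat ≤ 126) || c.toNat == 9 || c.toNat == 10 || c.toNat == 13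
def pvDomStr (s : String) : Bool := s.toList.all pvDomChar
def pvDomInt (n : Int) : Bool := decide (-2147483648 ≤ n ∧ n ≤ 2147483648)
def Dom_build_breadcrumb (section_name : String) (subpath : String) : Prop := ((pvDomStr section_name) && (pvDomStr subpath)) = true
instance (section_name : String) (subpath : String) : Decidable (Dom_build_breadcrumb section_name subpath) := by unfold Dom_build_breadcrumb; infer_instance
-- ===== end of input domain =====

-- B replaces A's accumulated-path string loop by a comprehension that recomputes each URL
-- prefix as a join of a parts prefix, and A's replace/replace/lower chain by one per-char map
-- (objective: alternative decomposition; equivalence of RETURN values, no mutation involved).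

-- ===== PORT A =====
-- pretty_name over code points; string concatenation / f-strings are ported via String.ofList
-- on char lists (exact on code points).
def prettyA (cs : List Char) : List Char :=
  -- s = name.replace('_', ' ').replace('-', ' ').lower()
  let s : List Char := PySem.Chars.lower (PySem.Chars.replace (PySem.Chars.replace cs ['_'] [' ']) ['-'] [' '])
  -- s[:1].upper() + s[1:]
  PySem.Chars.upper (PySem.Chars.slice s none (some 1)) ++ PySem.Chars.slice s (some 1) none

def pretty_name (name : String) : String := String.ofList (prettyA name.toList)

def build_breadcrumb (section_name : String) (subpath : String) : List (String × String) :=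
  -- parts = subpath.strip('/').split('/') if subpath else []
  let parts : List (List Char) :=
    if subpath ≠ "" then PySem.Chars.splitOn (PySem.Chars.stripChars subpath.toList ['/']) ['/'] else []
  -- breadcrumb = [(pretty_name(section_name), f'/{section_name}/')]
  let breadcrumb : List (String × String) :=
    [(pretty_name section_name, String.ofList ('/' :: section_name.toList ++ ['/']))]
  -- accumulated_path = ''; for part in parts: accumulated_path = f"{accumulated_path}/{part}".lstrip('/');
  -- .lstrip('/') is ported by hand as dropWhile (· = '/') — exact: it strips leading '/' only
  let st := parts.foldl (fun (st : List Char × List (String × String)) part =>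
      let accumulated := (st.1 ++ '/' :: part).dropWhile (· = '/')
      (accumulated, st.2 ++ [(pretty_name (String.ofList part),
        String.ofList ('/' :: section_name.toList ++ '/' :: accumulated ++ ['/']))])) (([] : List Char), breadcrumb)
  st.2

-- ===== PORT B =====
-- _pretty: one per-char map (c in '_-' → ' ', else c.lower()), then upper-case the first char.
def prettyB (cs : List Char) : List Char :=
  let chars := cs.map (fun c => if c = '_' ∨ c = '-' then ' ' else PySem.Chars.lowerChar c)
  match chars with
  | [] => []            -- return '' if chars is empty
  | c :: rest => PySem.Chars.upperChar c :: rest   -- chars[0].upper() + ''.join(chars[1:])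

def build_breadcrumb_alt (section_name : String) (subpath : String) : List (String × String) :=
  -- parts = subpath.strip('/').split('/') if subpath else []
  let parts : List (List Char) :=
    if subpath ≠ "" then PySem.Chars.splitOn (PySem.Chars.stripChars subpath.toList ['/']) ['/'] else []
  -- head = (_pretty(section_name), f'/{section_name}/')
  let head : String × String :=
    (String.ofList (prettyB section_name.toList), String.ofList ('/' :: section_name.toList ++ ['/']))
  -- [head] + [(_pretty(parts[i]), f"/{section_name}/{'/'.join(parts[:i+1])}/") for i in range(len(parts))]
  head :: (List.range parts.length).map (fun i =>
    (String.ofList (prettyB (parts.getD i [])),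
     String.ofList ('/' :: section_name.toList ++ '/' :: PySem.Chars.join ['/'] (parts.take (i + 1)) ++ ['/'])))

-- ===== PRECONDITION & SPEC =====
def Spec_build_breadcrumb (section_name : String) (subpath : String) (out : List (String × String)) : Prop := out = build_breadcrumb_alt section_name subpath
instance (section_name : String) (subpath : String) (out : List (String × String)) : Decidable (Spec_build_breadcrumb section_name subpath out) := by unfold Spec_build_breadcrumb; infer_instance

-- ===== CLAIM (what is proved, stated in full; the proofs are below) =====
def Claim_equal_build_breadcrumb : Prop := ∀ (section_name : String) (subpath : String), Dom_build_breadcrumb section_name subpath → Spec_build_breadcrumb section_name subpath (build_breadcrumb section_name subpath)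

-- ===== LEMMAS AND PROOFS =====

-- the two character maps behind prettyA / prettyB agree
theorem pvCharMap_eq (c : Char) :
    PySem.Chars.lowerChar (if (if c = '_' then ' ' else c) = '-' then ' ' else if c = '_' then ' ' else c)
      = (if c = '_' ∨ c = '-' then ' ' else PySem.Chars.lowerChar c) := by
  by_cases h1 : c = '_'
  · simp [h1]; decide
  · by_cases h2 : c = '-'
    · simp [h2]; decide
    · simp [h1, h2]

-- replace with a single-character pattern is a per-character map
theorem pvReplaceGo_single (o n : Char) :
    ∀ (l : List Char) (fuel : Nat) (acc : List Char), l.length ≤ fuel →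
      PySem.Chars.replace.go [o] [n] fuel l acc
        = acc.reverse ++ l.map (fun c => if c = o then n else c) := by
  intro l
  induction l with
  | nil =>
      intro fuel acc _
      cases fuel <;> simp [PySem.Chars.replace.go]
  | cons c t ih =>
      intro fuel acc hf
      cases fuel with
      | zero => simp at hf
      | succ f =>
        have hf' : t.length ≤ f := by simpa using hf
        have hco : ¬ o = c ↔ ¬ c = o := ⟨fun h h2 => h h2.symm, fun h h2 => h h2.symm⟩
        by_cases hc : c = o
        · subst hc
          simp [PySem.Chars.replace.go, List.isPrefixOf, ih f _ hf']
        · simp [PySem.Chars.replace.go, List.isPrefixOf, hco.2 hc, hc, ih f _ hf']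

theorem pvReplace_single (cs : List Char) (o n : Char) :
    PySem.Chars.replace cs [o] [n] = cs.map (fun c => if c = o then n else c) := by
  simpa [PySem.Chars.replace] using pvReplaceGo_single o n cs cs.length [] le_rfl

-- prettyA and prettyB agree on every character list
theorem pvPretty_eq (cs : List Char) : prettyA cs = prettyB cs := by
  unfold prettyA prettyB
  simp only [pvReplace_single, PySem.Chars.lower, List.map_map, PySem.Chars.slice_eq_listSlice]
  rw [PySem.List.slice_to _ (b := 1) (by norm_num), PySem.List.slice_from _ (a := 1) (by norm_num)]
  cases cs with
  | nil => simp [PySem.Chars.upper]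
  | cons c t =>
      simp only [List.map_cons, Int.toNat_one, List.take_succ_cons, List.take_zero,
        List.drop_succ_cons, List.drop_zero, PySem.Chars.upper, List.map_nil,
        Function.comp_def, pvCharMap_eq]
      simp

-- recursive reference splitter for split('/'): (first piece, remaining pieces)
def pvSplit : List Char → List Char × List (List Char)
  | [] => ([], [])
  | c :: cs =>
      let r := pvSplit cs
      if c = '/' then ([], r.1 :: r.2) else (c :: r.1, r.2)

theorem pvSplitOnGo_slash :
    ∀ (l : List Char) (fuel : Nat) (cur : List Char) (acc : List (List Char)), l.length < fuel →
      PySem.Chars.splitOn.go ['/'] fuel l cur acc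
        = acc.reverse ++ (cur.reverse ++ (pvSplit l).1) :: (pvSplit l).2 := by
  intro l
  induction l with
  | nil =>
      intro fuel cur acc hf
      cases fuel with
      | zero => simp at hf
      | succ f => simp [PySem.Chars.splitOn.go, pvSplit]
  | cons c t ih =>
      intro fuel cur acc hf
      cases fuel with
      | zero => simp at hf
      | succ f =>
        have hf' : t.length < f := by simpa using hf
        by_cases hc : c = '/'
        · subst hc
          simp [PySem.Chars.splitOn.go, List.isPrefixOf, ih f [] _ hf', pvSplit]
        · have hco : ¬ '/' = c := fun h => hc h.symm
          simp [PySem.Chars.splitOn.go, List.isPrefixOf, hco, hc, ih f (c :: cur) acc hf', pvSplit]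

theorem pvSplitOn_slash (cs : List Char) :
    PySem.Chars.splitOn cs ['/'] = (pvSplit cs).1 :: (pvSplit cs).2 := by
  simpa [PySem.Chars.splitOn] using pvSplitOnGo_slash cs (cs.length + 1) [] [] (by omega)

-- no piece produced by pvSplit contains '/'
theorem pvSplit_no_slash (cs : List Char) :
    '/' ∉ (pvSplit cs).1 ∧ ∀ p ∈ (pvSplit cs).2, '/' ∉ p := by
  induction cs with
  | nil => simp [pvSplit]
  | cons c t ih =>
      by_cases hc : c = '/'
      · subst hc
        refine ⟨by simp [pvSplit], ?_⟩
        intro p hp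
        simp [pvSplit] at hp
        rcases hp with h | h
        · exact h ▸ ih.1
        · exact ih.2 p h
      · exact ⟨by simp [pvSplit, hc, Ne.symm hc, ih.1], by simpa [pvSplit, hc] using ih.2⟩

-- the head of a dropWhile result fails the predicate
theorem pvHead_dropWhile {p : Char → Bool} :
    ∀ (l : List Char) (c : Char), (l.dropWhile p).head? = some c → p c = false := by
  intro l
  induction l with
  | nil => intro c h; simp at h
  | cons a t ih =>
      intro c h
      by_cases hpa : p a = true
      · rw [List.dropWhile_cons, if_pos hpa] at h
        exact ih c h
      · rw [List.dropWhile_cons, if_neg hpa] at h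
        simp at h
        subst h
        simpa using hpa

-- stripChars cs ['/'] never starts with '/'
theorem pvStrip_head (cs : List Char) (c : Char)
    (h : (PySem.Chars.stripChars cs ['/']).head? = some c) : ¬ c = '/' := by
  have hpre : PySem.Chars.stripChars cs ['/'] <+: List.dropWhile (fun x => ['/'].contains x) cs := by
    unfold PySem.Chars.stripChars
    have hs : List.dropWhile (fun x => ['/'].contains x)
        (List.dropWhile (fun x => ['/'].contains x) cs).reverse <:+
        (List.dropWhile (fun x => ['/'].contains x) cs).reverse :=
      List.dropWhile_suffix _
    have := List.reverse_prefix.mpr hs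
    simpa using this
  obtain ⟨r, hr⟩ := hpre
  have hhead : (List.dropWhile (fun x => ['/'].contains x) cs).head? = some c := by
    rw [← hr]
    cases hh : PySem.Chars.stripChars cs ['/'] with
    | nil => rw [hh] at h; simp at h
    | cons a l => rw [hh] at h; simp at h; simp [h]
  have := pvHead_dropWhile (p := fun x => ['/'].contains x) cs c hhead
  simp at this
  exact fun hcc => this (by simp [hcc])

-- the breadcrumb entries A's loop produces, as a recursion over the parts
def pvEntries (sec : List Char) : List Char → List (List Char) → List (String × String)
  | _, [] => []
  | acc, p :: ps =>
      let acc' := (acc ++ '/' :: p).dropWhile (· = '/')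
      (pretty_name (String.ofList p), String.ofList ('/' :: sec ++ '/' :: acc' ++ ['/']))
        :: pvEntries sec acc' ps

-- A's foldl appends exactly pvEntries
theorem pvFoldl_eq_entries (sec : List Char) :
    ∀ (ps : List (List Char)) (acc : List Char) (bc : List (String × String)),
      (ps.foldl (fun (st : List Char × List (String × String)) part =>
          let accumulated := (st.1 ++ '/' :: part).dropWhile (· = '/')
          (accumulated, st.2 ++ [(pretty_name (String.ofList part),
            String.ofList ('/' :: sec ++ '/' :: accumulated ++ ['/']))])) (acc, bc)).2
        = bc ++ pvEntries sec acc ps := by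
  intro ps
  induction ps with
  | nil => intro acc bc; simp [pvEntries]
  | cons p t ih =>
      intro acc bc
      simp only [List.foldl_cons, pvEntries]
      rw [ih]
      simp

-- with a nonempty accumulator that does not start with '/', and slash-free parts,
-- pvEntries is B's prefix-join comprehension
theorem pvEntries_eq_map (sec : List Char) :
    ∀ (ps : List (List Char)) (acc : List Char), acc ≠ [] → acc.head? ≠ some '/' →
      (∀ p ∈ ps, '/' ∉ p) →
      pvEntries sec acc ps = (List.range ps.length).map (fun i =>
        (String.ofList (prettyB (ps.getD i [])),
         String.ofList ('/' :: sec ++ '/' :: (acc ++ '/' :: PySem.Chars.join ['/'] (ps.take (i + 1))) ++ ['/']))) := by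
  intro ps
  induction ps with
  | nil => intro acc _ _ _; simp [pvEntries]
  | cons p t ih =>
      intro acc hne hhead hfree
      obtain ⟨a, as, rfl⟩ : ∃ a as, acc = a :: as := by
        cases acc with
        | nil => exact absurd rfl hne
        | cons a as => exact ⟨a, as, rfl⟩
      have ha : ¬ a = '/' := by simpa using hhead
      have hstep : ((a :: as) ++ '/' :: p).dropWhile (· = '/') = (a :: as) ++ '/' :: p := by
        rw [List.cons_append, List.dropWhile_cons, if_neg (by simpa using ha)]
      simp only [pvEntries, hstep]
      rw [ih ((a :: as) ++ '/' :: p) (by simp) (by simpa using ha)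
        (fun q hq => hfree q (List.mem_cons_of_mem p hq))]
      rw [show (p :: t).length = t.length + 1 from rfl, List.range_succ_eq_map]
      simp only [List.map_cons, List.map_map]
      simp only [List.cons.injEq]
      refine ⟨?_, ?_⟩
      · -- head entry
        simp [pretty_name, pvPretty_eq, PySem.Chars.join, List.intercalate]
      · -- tail entries
        apply List.map_congr_left
        intro i hi
        have hi' : i < t.length := List.mem_range.mp hi
        obtain ⟨q, qs, hq⟩ : ∃ q qs, t.take (i + 1) = q :: qs := by
          cases t with
          | nil => simp at hi'
          | cons x xs => exact ⟨x, xs.take i, by simp⟩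
        simp only [Function.comp_def, Nat.succ_eq_add_one, List.getD_cons_succ, List.take_succ_cons,
          hq, PySem.Chars.join_cons_cons]
        simp

-- the whole entry list from the empty accumulator, for a parts list whose first piece
-- starts with a non-'/' character
theorem pvEntries_top (sec : List Char) (c : Char) (cs1 : List Char) (rest : List (List Char))
    (hc : ¬ c = '/') (hfree : ∀ p ∈ (c :: cs1) :: rest, '/' ∉ p) :
    pvEntries sec [] ((c :: cs1) :: rest)
      = (List.range (rest.length + 1)).map (fun i =>
          (String.ofList (prettyB (((c :: cs1) :: rest).getD i [])),
           String.ofList ('/' :: sec ++ '/' :: PySem.Chars.join ['/'] (((c :: cs1) :: rest).take (i + 1)) ++ ['/']))) := by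
  have hacc : List.dropWhile (fun x => decide (x = '/')) (([] : List Char) ++ '/' :: c :: cs1) = c :: cs1 := by
    simp [hc]
  simp only [pvEntries, hacc]
  rw [pvEntries_eq_map sec rest (c :: cs1) (by simp) (by simpa using hc)
    (fun q hq => hfree q (List.mem_cons_of_mem _ hq))]
  rw [List.range_succ_eq_map]
  simp only [List.map_cons, List.map_map, List.cons.injEq]
  refine ⟨?_, ?_⟩
  · simp [pretty_name, pvPretty_eq, PySem.Chars.join, List.intercalate]
  · apply List.map_congr_left
    intro i hi
    have hi' : i < rest.length := List.mem_range.mp hi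
    obtain ⟨q, qs, hq⟩ : ∃ q qs, rest.take (i + 1) = q :: qs := by
      cases rest with
      | nil => simp at hi'
      | cons x xs => exact ⟨x, xs.take i, by simp⟩
    simp only [Function.comp_def, Nat.succ_eq_add_one, List.getD_cons_succ, List.take_succ_cons,
      hq, PySem.Chars.join_cons_cons]
    simp

theorem build_breadcrumb_spec : Claim_equal_build_breadcrumb := by
  intro sec sub _
  unfold Spec_build_breadcrumb build_breadcrumb build_breadcrumb_alt
  by_cases hs : sub = ""
  · simp [hs, pretty_name, pvPretty_eq]
  · simp only [ne_eq, hs, not_false_eq_true, if_pos]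
    have hhead := pvStrip_head sub.toList
    rw [pvSplitOn_slash]
    generalize hT : PySem.Chars.stripChars sub.toList ['/'] = t at *
    rw [pvFoldl_eq_entries]
    cases ht : t with
    | nil =>
        subst ht
        simp [pvSplit, pvEntries, pretty_name, pvPretty_eq, PySem.Chars.join, List.intercalate,
          List.range_succ]
    | cons c cs =>
        subst ht
        have hc : ¬ c = '/' := hhead c rfl
        have hsp : pvSplit (c :: cs) = (c :: (pvSplit cs).1, (pvSplit cs).2) := by
          simp [pvSplit, hc]
        rw [hsp]
        have hfree : ∀ p ∈ (c :: (pvSplit cs).1) :: (pvSplit cs).2, '/' ∉ p := by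
          intro p hp
          rcases List.mem_cons.mp hp with h | h
          · subst h
            simp [(pvSplit_no_slash cs).1]
            exact fun h => hc h.symm
          · exact (pvSplit_no_slash cs).2 p h
        rw [pvEntries_top sec.toList c (pvSplit cs).1 (pvSplit cs).2 hc hfree]
        simp [pretty_name, pvPretty_eq]
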